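-- pv_equiv track=rewrite | github.com/ERGO-Telescope/RasPi | RasShieldNew.py | join2
-- ===== SOURCE A (Python) =====
-- def join2(buffer, position=int):
--     toJoin=[]
--     newPosition=position
--     for i in range(position,position+2):
--         intOfByte=int(buffer[newPosition],16)
--         toJoin.append(intOfByte)
--         newPosition+=1
--     union=int.from_bytes(toJoin,byteorder='little',signed=True)
--     return union
-- ===== SOURCE B (Python) =====
-- def join2(buffer, position=int):
--     # Branch-free: the high byte is sign-extended by modular arithmetic
--     # ((hi+128) % 256 - 128), then scaled; no list, no int.from_bytes, no comparison.
--     hi = int(buffer[position + 1], 16)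
--     return int(buffer[position], 16) + ((hi + 128) % 256 - 128) * 256
-- ===== Notes on version B (the rewrite author's own statement) =====
-- stated objective: simpler
-- what changed: B drops A's list-building loop and the int.from_bytes byte-decoder entirely: it sign-extends the high byte alone by branch-free modular arithmetic ((hi+128)%256-128), scales it by 256 and adds the low byte, so no 16-bit word is ever assembled, no sign-bit test is made and no wide-value correction (subtracting 65536) occurs.
import Mathlib
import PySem

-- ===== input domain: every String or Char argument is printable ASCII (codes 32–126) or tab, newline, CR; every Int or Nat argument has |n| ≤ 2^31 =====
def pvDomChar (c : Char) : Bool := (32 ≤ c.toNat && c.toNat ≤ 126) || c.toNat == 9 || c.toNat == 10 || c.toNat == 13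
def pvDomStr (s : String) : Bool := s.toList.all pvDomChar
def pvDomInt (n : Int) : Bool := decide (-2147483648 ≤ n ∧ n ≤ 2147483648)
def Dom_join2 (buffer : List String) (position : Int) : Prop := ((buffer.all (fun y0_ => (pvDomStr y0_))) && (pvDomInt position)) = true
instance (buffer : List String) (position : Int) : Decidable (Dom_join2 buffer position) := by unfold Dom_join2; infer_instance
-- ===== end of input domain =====

-- B replaces A's loop + int.from_bytes with a branch-free formula that sign-extends the high
-- byte by modular arithmetic; simpler, same cost; equivalence is about the return value only.

-- ===== PORT A =====
-- int.from_bytes(bytes, 'little', signed=True): exact — checks every byte in 0..255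
-- (else ValueError → none), folds little-endian, subtracts 2^(8n) when the sign bit is set.
def pyFromBytesLittleSigned (bytes : List Int) : Option Int :=
  if bytes.all (fun b => decide (0 ≤ b) && decide (b ≤ 255)) then
    let u := bytes.foldr (fun b acc => b + 256 * acc) 0
    let m : Int := 256 ^ bytes.length
    some (if 2 * u ≥ m then u - m else u)
  else none

def join2 (buffer : List String) (position : Int) : Int :=
  -- for i in range(position, position+2): toJoin.append(int(buffer[newPosition],16)); newPosition += 1
  let st := (PySem.List.pyRange position (position + 2) 1).foldl
    (fun (st : Option (List Int × Int)) _i =>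
      match st with
      | none => none
      | some (toJoin, newPosition) =>
        match PySem.List.pyGet? buffer newPosition with
        | none => none            -- IndexError (outside Pre_)
        | some s =>
          match PySem.Int.ofStrBase? s 16 with
          | none => none          -- ValueError (outside Pre_)
          | some intOfByte => some (toJoin ++ [intOfByte], newPosition + 1))
    (some ([], position))
  match st with
  | none => 0                     -- A raised; outside Pre_
  | some (toJoin, _) => (pyFromBytesLittleSigned toJoin).getD 0

-- ===== PORT B =====
def join2_alt (buffer : List String) (position : Int) : Int :=
  match PySem.List.pyGet? buffer (position + 1) with
  | none => 0                     -- IndexError (outside Pre_)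
  | some shi =>
    match PySem.Int.ofStrBase? shi 16 with
    | none => 0                   -- ValueError (outside Pre_)
    | some hi =>
      match PySem.List.pyGet? buffer position with
      | none => 0
      | some slo =>
        match PySem.Int.ofStrBase? slo 16 with
        | none => 0
        | some lo => lo + (PySem.Int.mod (hi + 128) 256 - 128) * 256

-- ===== PRECONDITION & SPEC =====
-- helper: buffer[i] parsed as a base-16 int, none where Python would raise
def hexAt (buffer : List String) (i : Int) : Option Int :=
  (PySem.List.pyGet? buffer i).bind (fun s => PySem.Int.ofStrBase? s 16)

-- Pre_ = exactly the inputs on which A returns: both positions index into buffer, both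
-- entries parse as hex ints, and both values are valid bytes (else int.from_bytes raises).
def Pre_join2 (buffer : List String) (position : Int) : Prop :=
  match hexAt buffer position, hexAt buffer (position + 1) with
  | some lo, some hi => 0 ≤ lo ∧ lo ≤ 255 ∧ 0 ≤ hi ∧ hi ≤ 255
  | _, _ => False

instance (buffer : List String) (position : Int) : Decidable (Pre_join2 buffer position) := by
  unfold Pre_join2
  rcases hexAt buffer position with _ | lo <;> rcases hexAt buffer (position + 1) with _ | hi <;> infer_instance

def pvWitness_join2 : List String × Int := (["ff", "7f"], 0)

def Spec_join2 (buffer : List String) (position : Int) (out : Int) : Prop := out = join2_alt buffer position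
instance (buffer : List String) (position : Int) (out : Int) : Decidable (Spec_join2 buffer position out) := by unfold Spec_join2; infer_instance

-- ===== CLAIM (what is proved, stated in full; the proofs are below) =====
def Claim_equal_join2 : Prop := ∀ (buffer : List String) (position : Int), Dom_join2 buffer position → Pre_join2 buffer position → Spec_join2 buffer position (join2 buffer position)

-- ===== LEMMAS AND PROOFS =====
theorem pyRange_two (a : Int) : PySem.List.pyRange a (a + 2) 1 = [a, a + 1] := by
  rw [PySem.List.pyRange_one_cons (by omega), PySem.List.pyRange_one_cons (by omega),
      show a + 1 + 1 = a + 2 by ring]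
  simp [PySem.List.pyRange]

-- ===== VERDICT (by name: the statement is the Claim_ definition above) =====
theorem join2_spec : Claim_equal_join2 := by
  intro buffer position _ hpre
  unfold Pre_join2 hexAt at hpre
  unfold Spec_join2 join2 join2_alt
  rw [pyRange_two]
  rcases h1 : PySem.List.pyGet? buffer position with _ | slo
  · simp [h1] at hpre
  rcases h2 : PySem.Int.ofStrBase? slo 16 with _ | lo
  · simp [h1, h2] at hpre
  rcases h3 : PySem.List.pyGet? buffer (position + 1) with _ | shi
  · simp [h1, h2, h3] at hpre
  rcases h4 : PySem.Int.ofStrBase? shi 16 with _ | hi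
  · simp [h1, h2, h3, h4] at hpre
  simp only [h1, h2, h3, h4, Option.bind_some] at hpre
  obtain ⟨hlo0, hlo1, hhi0, hhi1⟩ := hpre
  simp only [List.foldl, h1, h2, h3, h4]
  unfold pyFromBytesLittleSigned
  have hlist : ([] : List Int) ++ [lo] ++ [hi] = [lo, hi] := by simp
  rw [hlist]
  have hall : ([lo, hi]).all (fun b => decide (0 ≤ b) && decide (b ≤ 255)) = true := by
    simp [hlo0, hlo1, hhi0, hhi1]
  simp only [hall, if_true, List.foldr, List.length]
  rw [PySem.Int.mod_eq_emod_of_pos (by norm_num)]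
  have : (256 : Int) ^ 2 = 65536 := by norm_num
  rw [this]
  simp only [Option.getD_some]
  split_ifs <;> omega
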